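-- pv_equiv track=rewrite | github.com/rayyanaamir22/Algorithms | Math Algorithms/Python/sets.py | approxEvenSubsets
-- ===== SOURCE A (Python) =====
-- def approxEvenSubsets(n): # Doesn't work
--     nums = list(range(1, n+1))
--
--     # Organize nums into 4-element subsets
--     subLists = []
--     while (nums): # List is not empty
--         if (len(nums)>4):
--             sub = nums[:5] # First 4 elements
--             nums = nums[5:] # Remove first 4 elements of nums
--         else:
--             sub = nums
--             nums = [] # Loop will terminate
--
--         subLists.append(sub)
--
--
--     subset1, subset2 = [], []
--     for lst in subLists:
--         subset1.extend(lst[:3]) # First 2 items to s1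
--         subset2.extend(lst[3:]) # Last 2 items to s2
--
--     return subset1, subset2
-- ===== SOURCE B (Python) =====
-- def approxEvenSubsets(n):
--     subset1, subset2 = [], []
--     for i in range(1, n + 1):
--         if (i - 1) % 5 < 3:
--             subset1.append(i)
--         else:
--             subset2.append(i)
--     return subset1, subset2
-- ===== Notes on version B (the rewrite author's own statement) =====
-- stated objective: faster
-- what changed: Replaced the quadratic chunk-into-groups-of-five-then-split pipeline (repeated list slicing) by a single pass that routes each element directly by its position within its group of five.
import Mathlib
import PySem

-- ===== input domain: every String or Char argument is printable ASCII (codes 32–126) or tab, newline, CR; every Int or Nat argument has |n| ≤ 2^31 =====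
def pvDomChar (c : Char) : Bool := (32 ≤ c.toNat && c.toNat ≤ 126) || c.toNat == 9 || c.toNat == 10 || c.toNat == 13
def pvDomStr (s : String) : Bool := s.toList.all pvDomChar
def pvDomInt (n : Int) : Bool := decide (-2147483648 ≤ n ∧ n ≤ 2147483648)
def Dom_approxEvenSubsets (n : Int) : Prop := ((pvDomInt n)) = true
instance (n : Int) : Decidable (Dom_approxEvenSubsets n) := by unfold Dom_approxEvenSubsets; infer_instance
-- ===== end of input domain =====

-- B replaces A's chunk-into-groups-of-five-then-split pipeline by a single pass
-- routing each i by its position within its group of five (objective: faster).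

-- ===== PORT A =====
-- the 'while (nums)' loop: builds subLists, chopping 5 off the front each round
def pvWhileA (nums : List Int) (subLists : List (List Int)) : List (List Int) :=
  if nums = [] then subLists
  else if nums.length > 4 then
    pvWhileA (PySem.List.slice nums (some 5) none)
             (subLists ++ [PySem.List.slice nums none (some 5)])
  else
    pvWhileA [] (subLists ++ [nums])
termination_by nums.length
decreasing_by
  · rw [PySem.List.slice_from (a := 5) _ (by norm_num)]
    simp only [List.length_drop]; omega
  · simp only [List.length_nil]
    exact List.length_pos_of_ne_nil (by assumption)

def approxEvenSubsets (n : Int) : List Int × List Int :=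
  let nums := PySem.List.pyRange 1 (n + 1) 1
  let subLists := pvWhileA nums []
  subLists.foldl
    (fun (p : List Int × List Int) lst =>
      (p.1 ++ PySem.List.slice lst none (some 3), p.2 ++ PySem.List.slice lst (some 3) none))
    ([], [])

-- ===== PORT B =====
def approxEvenSubsets_alt (n : Int) : List Int × List Int :=
  (PySem.List.pyRange 1 (n + 1) 1).foldl
    (fun (p : List Int × List Int) i =>
      if PySem.Int.mod (i - 1) 5 < 3 then (p.1 ++ [i], p.2) else (p.1, p.2 ++ [i]))
    ([], [])

-- ===== PRECONDITION & SPEC =====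
def Spec_approxEvenSubsets (n : Int) (out : List Int × List Int) : Prop := out = approxEvenSubsets_alt n
instance (n : Int) (out : List Int × List Int) : Decidable (Spec_approxEvenSubsets n out) := by unfold Spec_approxEvenSubsets; infer_instance

-- ===== CLAIM (what is proved, stated in full; the proofs are below) =====
def Claim_equal_approxEvenSubsets : Prop := ∀ (n : Int), Dom_approxEvenSubsets n → Spec_approxEvenSubsets n (approxEvenSubsets n)

-- ===== LEMMAS AND PROOFS =====

-- A's fold over the sublists, abbreviated
def pvF (p : List Int × List Int) (ls : List (List Int)) : List Int × List Int :=
  ls.foldl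
    (fun (p : List Int × List Int) lst =>
      (p.1 ++ PySem.List.slice lst none (some 3), p.2 ++ PySem.List.slice lst (some 3) none)) p

-- B's step
def pvG (p : List Int × List Int) (i : Int) : List Int × List Int :=
  if PySem.Int.mod (i - 1) 5 < 3 then (p.1 ++ [i], p.2) else (p.1, p.2 ++ [i])

lemma pvWhileA_acc' (nums : List Int) (L2 : List (List Int)) :
    ∀ L1, pvWhileA nums (L1 ++ L2) = L1 ++ pvWhileA nums L2 := by
  induction nums, L2 using pvWhileA.induct with
  | case1 L2 =>
      intro L1
      conv_lhs => rw [pvWhileA]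
      conv_rhs => rw [pvWhileA]
      simp
  | case2 nums L2 h hl ih =>
      intro L1
      conv_lhs => rw [pvWhileA]
      conv_rhs => rw [pvWhileA]
      simp only [if_neg h, if_pos hl]
      rw [List.append_assoc]; exact ih L1
  | case3 nums L2 h hl ih =>
      intro L1
      conv_lhs => rw [pvWhileA]
      conv_rhs => rw [pvWhileA]
      simp only [if_neg h, if_neg hl]
      rw [List.append_assoc]; exact ih L1

lemma pvWhileA_acc (nums : List Int) (L : List (List Int)) :
    pvWhileA nums L = L ++ pvWhileA nums [] := by
  simpa using pvWhileA_acc' nums [] L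

-- pyRange a (a+m) 1 as a literal-friendly map over List.range m
lemma pvRange_lit (a : Int) (m : Nat) :
    PySem.List.pyRange a (a + m) 1 = (List.range m).map (fun k : Nat => a + (k : Int)) := by
  rw [PySem.List.pyRange_one, show ((a + (m:Int) - a).toNat) = m by omega]

lemma chunks_fold (m : Nat) : ∀ (a : Int) (p : List Int × List Int),
    PySem.Int.mod (a - 1) 5 = 0 →
    pvF p (pvWhileA (PySem.List.pyRange a (a + m) 1) []) =
      (PySem.List.pyRange a (a + m) 1).foldl pvG p := by
  induction m using Nat.strong_induction_on with
  | _ m ih =>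
  intro a p ha
  rw [PySem.Int.mod_eq_emod_of_pos (by norm_num)] at ha
  have hGpos : ∀ (q : List Int × List Int) (i : Int), (i - 1) % 5 < 3 →
      pvG q i = (q.1 ++ [i], q.2) := by
    intro q i h; simp [pvG, h]
  have hGneg : ∀ (q : List Int × List Int) (i : Int), ¬ (i - 1) % 5 < 3 →
      pvG q i = (q.1, q.2 ++ [i]) := by
    intro q i h; simp [pvG, h]
  rcases Nat.eq_zero_or_pos m with hm0 | hmpos
  · subst hm0
    rw [show a + ((0:Nat):Int) = a by push_cast; ring, PySem.List.pyRange_one_eq_nil le_rfl]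
    rw [pvWhileA]; simp [pvF]
  have hlen : (PySem.List.pyRange a (a + m) 1).length = m := by
    rw [PySem.List.length_pyRange_one]; omega
  have hne : PySem.List.pyRange a (a + m) 1 ≠ [] := by
    intro h; rw [h] at hlen; simp at hlen; omega
  by_cases h5 : 5 ≤ m
  · -- one full chunk of five, then recurse
    have hsplit : PySem.List.pyRange a (a + m) 1 =
        PySem.List.pyRange a (a + 5) 1 ++ PySem.List.pyRange (a + 5) (a + m) 1 :=
      PySem.List.pyRange_one_append a (a + 5) (a + m) (by omega) (by omega)
    have hr1 : PySem.List.pyRange a (a + 5) 1 = [a, a+1, a+2, a+3, a+4] := by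
      rw [show (a:Int) + 5 = a + ((5:Nat):Int) by norm_num, pvRange_lit]
      simp [List.range_succ]
    conv_lhs => rw [pvWhileA]
    rw [if_neg hne, if_pos (by omega)]
    have htake : PySem.List.slice (PySem.List.pyRange a (a + m) 1) none (some 5) =
        [a, a+1, a+2, a+3, a+4] := by
      rw [PySem.List.slice_to (b := 5) _ (by norm_num), show ((5:Int)).toNat = 5 from rfl,
          hsplit, List.take_append_of_le_length (by rw [hr1]; simp), hr1]
      simp
    have hdrop : PySem.List.slice (PySem.List.pyRange a (a + m) 1) (some 5) none =
        PySem.List.pyRange (a + 5) (a + m) 1 := by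
      rw [PySem.List.slice_from (a := 5) _ (by norm_num), show ((5:Int)).toNat = 5 from rfl,
          hsplit, List.drop_append_of_le_length (by rw [hr1]; simp), hr1]
      simp
    rw [htake, hdrop, pvWhileA_acc]
    have hstep : pvF p [[a, a+1, a+2, a+3, a+4]] =
        (p.1 ++ [a, a+1, a+2], p.2 ++ [a+3, a+4]) := by
      simp only [pvF, List.foldl_cons, List.foldl_nil]
      rw [PySem.List.slice_to (b := 3) _ (by norm_num),
          PySem.List.slice_from (a := 3) _ (by norm_num), show ((3:Int)).toNat = 3 from rfl]
      simp
    have hfoldB : List.foldl pvG p [a, a+1, a+2, a+3, a+4] =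
        (p.1 ++ [a, a+1, a+2], p.2 ++ [a+3, a+4]) := by
      simp only [List.foldl_cons, List.foldl_nil]
      rw [hGpos _ a (by omega), hGpos _ (a+1) (by omega), hGpos _ (a+2) (by omega),
          hGneg _ (a+3) (by omega), hGneg _ (a+4) (by omega)]
      simp
    calc pvF p ([[a, a+1, a+2, a+3, a+4]] ++ pvWhileA (PySem.List.pyRange (a + 5) (a + m) 1) [])
        = pvF (pvF p [[a, a+1, a+2, a+3, a+4]]) (pvWhileA (PySem.List.pyRange (a + 5) (a + m) 1) []) := by
          simp [pvF]
      _ = (PySem.List.pyRange (a+5) (a + m) 1).foldl pvG (pvF p [[a, a+1, a+2, a+3, a+4]]) := by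
          rw [hstep, show a + (m:Int) = (a + 5) + ((m - 5 : Nat) : Int) by omega]
          exact ih (m - 5) (by omega) (a + 5) _
            (by rw [PySem.Int.mod_eq_emod_of_pos (by norm_num)]; omega)
      _ = (PySem.List.pyRange a (a + m) 1).foldl pvG p := by
          rw [hsplit, List.foldl_append, hr1, hfoldB, hstep]
  · -- last short chunk, 1 ≤ m ≤ 4
    conv_lhs => rw [pvWhileA]
    rw [if_neg hne, if_neg (by omega), pvWhileA, if_pos rfl, List.nil_append]
    rcases (by omega : m = 1 ∨ m = 2 ∨ m = 3 ∨ m = 4) with h|h|h|h <;> subst h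
    · rw [show PySem.List.pyRange a (a + ((1:Nat):Int)) 1 = [a] by rw [pvRange_lit]; simp]
      simp only [pvF, List.foldl_cons, List.foldl_nil]
      rw [PySem.List.slice_to (b := 3) _ (by norm_num),
          PySem.List.slice_from (a := 3) _ (by norm_num), show ((3:Int)).toNat = 3 from rfl,
          hGpos _ a (by omega)]
      simp
    · rw [show PySem.List.pyRange a (a + ((2:Nat):Int)) 1 = [a, a+1] by
        rw [pvRange_lit]; simp [List.range_succ]]
      simp only [pvF, List.foldl_cons, List.foldl_nil]
      rw [PySem.List.slice_to (b := 3) _ (by norm_num),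
          PySem.List.slice_from (a := 3) _ (by norm_num), show ((3:Int)).toNat = 3 from rfl,
          hGpos _ a (by omega), hGpos _ (a+1) (by omega)]
      simp
    · rw [show PySem.List.pyRange a (a + ((3:Nat):Int)) 1 = [a, a+1, a+2] by
        rw [pvRange_lit]; simp [List.range_succ]]
      simp only [pvF, List.foldl_cons, List.foldl_nil]
      rw [PySem.List.slice_to (b := 3) _ (by norm_num),
          PySem.List.slice_from (a := 3) _ (by norm_num), show ((3:Int)).toNat = 3 from rfl,
          hGpos _ a (by omega), hGpos _ (a+1) (by omega), hGpos _ (a+2) (by omega)]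
      simp
    · rw [show PySem.List.pyRange a (a + ((4:Nat):Int)) 1 = [a, a+1, a+2, a+3] by
        rw [pvRange_lit]; simp [List.range_succ]]
      simp only [pvF, List.foldl_cons, List.foldl_nil]
      rw [PySem.List.slice_to (b := 3) _ (by norm_num),
          PySem.List.slice_from (a := 3) _ (by norm_num), show ((3:Int)).toNat = 3 from rfl,
          hGpos _ a (by omega), hGpos _ (a+1) (by omega), hGpos _ (a+2) (by omega),
          hGneg _ (a+3) (by omega)]
      simp

-- ===== VERDICT (by name: the statement is the Claim_ definition above) =====
theorem approxEvenSubsets_spec : Claim_equal_approxEvenSubsets := by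
  intro n _
  unfold Spec_approxEvenSubsets
  have hA : approxEvenSubsets n = pvF ([], []) (pvWhileA (PySem.List.pyRange 1 (n + 1) 1) []) := rfl
  have hB : approxEvenSubsets_alt n = (PySem.List.pyRange 1 (n + 1) 1).foldl pvG ([], []) := rfl
  rw [hA, hB]
  by_cases hn : n ≤ 0
  · rw [PySem.List.pyRange_one_eq_nil (by omega)]
    rw [pvWhileA]; simp [pvF]
  · rw [show n + 1 = 1 + ((n.toNat : Int)) by omega]
    exact chunks_fold n.toNat 1 ([], []) (by decide)
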